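-- pv_equiv track=rewrite | github.com/ir-anthology/ir-anthology-scraper | scripts/scraper.py | _append_suffixes_to_bibkeys
-- ===== SOURCE A (Python) =====
-- def _append_suffixes_to_bibkeys(ir_anthology_bibkeys):
--     """
--     Appends deduplication suffixes to a list of bibkeys.
--     First entry of a given bibkey receives no suffixm,
--     second entry ends in -2, third ends in -3, and so on.
--
--     Args:
--         ir_anthology_bibkeys: List of bibkeys.
--     Returns:
--         List of bibkeys with deduplication suffixes added where applicable.
--     """
--     ir_anthology_bibkey_counts = {}
--
--     ir_anthology_bibkeys_with_suffixes = []
--     for ir_anthology_bibkey in ir_anthology_bibkeys: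
--         if ir_anthology_bibkey not in ir_anthology_bibkey_counts:
--             ir_anthology_bibkeys_with_suffixes.append(ir_anthology_bibkey)
--             ir_anthology_bibkey_counts[ir_anthology_bibkey] = 2
--         else:
--             ir_anthology_bibkeys_with_suffixes.append(ir_anthology_bibkey + "-" + str(ir_anthology_bibkey_counts[ir_anthology_bibkey]))
--             ir_anthology_bibkey_counts[ir_anthology_bibkey] += 1
--     return ir_anthology_bibkeys_with_suffixes
-- ===== SOURCE B (Python) =====
-- def _append_suffixes_to_bibkeys(ir_anthology_bibkeys):
--     """Group-then-scatter: first collect, per bibkey, the list of positions where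
--     it occurs; then copy the input and overwrite each key's second-and-later
--     positions in place with the ranked suffix form."""
--     positions = {}
--     for i, key in enumerate(ir_anthology_bibkeys):
--         positions[key] = positions.get(key, []) + [i]
--     out = list(ir_anthology_bibkeys)
--     for key, idxs in positions.items():
--         for rank, i in enumerate(idxs[1:], start=2):
--             out[i] = key + "-" + str(rank)
--     return out
-- ===== Notes on version B (the rewrite author's own statement) =====
-- stated objective: alternative
-- what changed: B replaces A's single streaming pass with a running-count dictionary by a group-then-scatter algorithm: it first builds a dict mapping each bibkey to the list of its positions, then copies the input and overwrites each key's second-and-later positions in place with the ranked suffix.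
import Mathlib
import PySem

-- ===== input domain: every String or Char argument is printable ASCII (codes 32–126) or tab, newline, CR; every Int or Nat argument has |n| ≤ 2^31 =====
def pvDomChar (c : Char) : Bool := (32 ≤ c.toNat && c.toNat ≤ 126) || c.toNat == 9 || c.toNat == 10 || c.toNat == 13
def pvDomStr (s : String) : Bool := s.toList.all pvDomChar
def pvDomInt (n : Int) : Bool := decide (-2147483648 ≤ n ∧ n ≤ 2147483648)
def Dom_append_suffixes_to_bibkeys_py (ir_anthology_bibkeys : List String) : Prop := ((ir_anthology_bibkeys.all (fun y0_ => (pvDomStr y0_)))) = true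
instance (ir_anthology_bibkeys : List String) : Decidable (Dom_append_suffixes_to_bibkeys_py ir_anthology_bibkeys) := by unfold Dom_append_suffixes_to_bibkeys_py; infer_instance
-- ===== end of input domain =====

-- B replaces A's streaming running-count pass by a group-then-scatter algorithm (alternative decomposition, not faster).

-- ===== PORT A =====
-- loop body of A: dict test / append / count update, branches in Python's order
def pvStepA (st : PySem.Dict String Int × List String) (k : String) :
    PySem.Dict String Int × List String :=
  if st.1.contains k = false then
    (st.1.insert k 2, st.2 ++ [k])
  else
    (st.1.insert k (st.1.getD k 0 + 1),
     st.2 ++ [k ++ "-" ++ PySem.Int.toStr (st.1.getD k 0)])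

def append_suffixes_to_bibkeys_py (ir_anthology_bibkeys : List String) : List String :=
  (ir_anthology_bibkeys.foldl pvStepA (PySem.Dict.empty, [])).2

-- ===== PORT B =====
-- pass 1: positions[key] = positions.get(key, []) + [i]  over enumerate(keys)
-- pass 2: out = list(keys); for key, idxs in positions.items(): for rank, i in enumerate(idxs[1:], 2): out[i] = key + "-" + str(rank)
def append_suffixes_to_bibkeys_py_alt (ir_anthology_bibkeys : List String) : List String :=
  let positions := (PySem.List.enumerate ir_anthology_bibkeys).foldl
      (fun d p => d.modify p.2 [] (· ++ [p.1])) PySem.Dict.empty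
  positions.items.foldl
    (fun out kidxs =>
      (PySem.List.enumerate (PySem.List.slice kidxs.2 (some 1) none) 2).foldl
        (fun out2 ri => PySem.List.pySetD out2 ri.2 (kidxs.1 ++ "-" ++ PySem.Int.toStr ri.1)) out)
    ir_anthology_bibkeys

-- ===== PRECONDITION & SPEC =====
def Spec_append_suffixes_to_bibkeys_py (ir_anthology_bibkeys : List String) (out : List String) : Prop := out = append_suffixes_to_bibkeys_py_alt ir_anthology_bibkeys
instance (ir_anthology_bibkeys : List String) (out : List String) : Decidable (Spec_append_suffixes_to_bibkeys_py ir_anthology_bibkeys out) := by unfold Spec_append_suffixes_to_bibkeys_py; infer_instance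

-- ===== CLAIM (what is proved, stated in full; the proofs are below) =====
def Claim_equal_append_suffixes_to_bibkeys_py : Prop := ∀ (ir_anthology_bibkeys : List String), Dom_append_suffixes_to_bibkeys_py ir_anthology_bibkeys → Spec_append_suffixes_to_bibkeys_py ir_anthology_bibkeys (append_suffixes_to_bibkeys_py ir_anthology_bibkeys)

-- ===== LEMMAS AND PROOFS =====

-- the entry emitted for bibkey k whose processed prefix already holds c copies of it
def pvFmt (c : Nat) (k : String) : String :=
  if c = 0 then k else k ++ "-" ++ PySem.Int.toStr ((c : Nat) + 1)

-- reference output: entries for remaining keys `rem` after processed prefix `p`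
def pvGo (p rem : List String) : List String :=
  match rem with
  | [] => []
  | k :: t => pvFmt (p.count k) k :: pvGo (p ++ [k]) t

-- ---- A-side: fold with the counts dict computes pvGo [] ----
def pvInv (d : PySem.Dict String Int) (p : List String) : Prop :=
  ∀ k, d.get? k = if p.count k = 0 then none else some ((p.count k : Int) + 1)

lemma pvContains_eq (d : PySem.Dict String Int) (p : List String) (h : pvInv d p) (k : String) :
    d.contains k = !(decide (p.count k = 0)) := by
  have := h k
  rw [PySem.Dict.contains_eq_isSome_get?, this]
  by_cases hc : p.count k = 0 <;> simp [hc]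

lemma pvGetD_eq (d : PySem.Dict String Int) (p : List String) (h : pvInv d p) (k : String)
    (hk : p.count k ≠ 0) : d.getD k 0 = (p.count k : Int) + 1 := by
  rw [PySem.Dict.getD_eq_get?_getD, h k]
  simp [hk]

lemma pvInv_step (d : PySem.Dict String Int) (p : List String) (h : pvInv d p) (k : String)
    (v : Int) (hv : v = (p.count k : Int) + 2) :
    pvInv (d.insert k v) (p ++ [k]) := by
  intro k'
  by_cases hk : k' = k
  · subst hk
    rw [PySem.Dict.get?_insert_self]
    simp [List.count_append, hv]
    ring
  · have hk' : k ≠ k' := fun h => hk h.symm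
    rw [PySem.Dict.get?_insert_of_ne d v hk, h k']
    simp [List.count_append, hk']

lemma pvFoldA (rem : List String) : ∀ (p : List String) (d : PySem.Dict String Int)
    (out : List String), pvInv d p →
    (rem.foldl pvStepA (d, out)).2 = out ++ pvGo p rem := by
  induction rem with
  | nil => intro p d out _; simp [pvGo]
  | cons k t ih =>
    intro p d out h
    simp only [List.foldl_cons, pvGo]
    by_cases hc : p.count k = 0
    · have hstep : pvStepA (d, out) k = (d.insert k 2, out ++ [k]) := by
        simp [pvStepA, pvContains_eq d p h k, hc]
      rw [hstep, ih (p ++ [k]) _ _ (pvInv_step d p h k 2 (by simp [hc]))]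
      simp [hc, pvFmt]
    · have hg := pvGetD_eq d p h k hc
      have hstep : pvStepA (d, out) k =
          (d.insert k ((p.count k : Int) + 1 + 1),
           out ++ [k ++ "-" ++ PySem.Int.toStr ((p.count k : Int) + 1)]) := by
        simp [pvStepA, pvContains_eq d p h k, hc, hg]
    
      rw [hstep, ih (p ++ [k]) _ _ (pvInv_step d p h k _ (by ring))]
      simp [hc, pvFmt]

lemma pvInv_empty : pvInv PySem.Dict.empty [] := by
  intro k; simp [PySem.Dict.get?, PySem.Dict.empty]

lemma pvA_eq_go (keys : List String) :
    append_suffixes_to_bibkeys_py keys = pvGo [] keys := by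
  unfold append_suffixes_to_bibkeys_py
  rw [pvFoldA keys [] PySem.Dict.empty [] pvInv_empty]
  simp

-- pointwise description of pvGo
lemma pvGo_length (rem : List String) : ∀ p, (pvGo p rem).length = rem.length := by
  induction rem with
  | nil => intro p; simp [pvGo]
  | cons k t ih => intro p; simp [pvGo, ih]

lemma pvGo_getElem? (rem : List String) : ∀ (p : List String) (j : Nat) (hj : j < rem.length),
    (pvGo p rem)[j]? = some (pvFmt ((p ++ rem.take j).count (rem[j])) (rem[j])) := by
  induction rem with
  | nil => intro p j hj; simp at hj
  | cons k t ih =>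
    intro p j hj
    cases j with
    | zero => simp [pvGo]
    | succ j' =>
      have hj' : j' < t.length := by simpa using hj
      simp only [pvGo, List.getElem?_cons_succ, List.take_succ_cons, List.getElem_cons_succ]
      rw [ih (p ++ [k]) j' hj']
      simp

-- ---- B-side ----

-- absolute positions (as Ints) of bibkey c in keys, in order
def pvOcc (keys : List String) (c : String) : List Int :=
  ((PySem.List.enumerate keys).filter (fun p => p.2 == c)).map (·.1)

-- the (index, value) assignments generated for one dict item
def pvAsg (kidxs : String × List Int) : List (Int × String) :=
  (PySem.List.enumerate (PySem.List.slice kidxs.2 (some 1) none) 2).map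
    (fun ri => (ri.2, kidxs.1 ++ "-" ++ PySem.Int.toStr ri.1))

-- sequential in-place assignments
def pvApply (o : List String) (l : List (Int × String)) : List String :=
  l.foldl (fun o p => PySem.List.pySetD o p.1 p.2) o

lemma pvSlice_drop (idxs : List Int) : PySem.List.slice idxs (some 1) none = idxs.drop 1 := by
  have := PySem.List.slice_from idxs (a := 1) (by norm_num)
  simpa using this

lemma pvOcc_sound (keys : List String) (c : String) : ∀ (s : Int) (j : Nat) (i : Int),
    ((((PySem.List.enumerate keys s).filter (fun p => p.2 == c)).map (·.1))[j]? = some i) →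
    ∃ m : Nat, ∃ hm : m < keys.length, i = s + m ∧ keys[m] = c ∧ (keys.take m).count c = j := by
  induction keys with
  | nil => intro s j i h; simp [PySem.List.enumerate_nil] at h
  | cons k t ih =>
    intro s j i h
    rw [PySem.List.enumerate_cons] at h
    by_cases hk : k = c
    · subst hk
      simp only [List.filter_cons, beq_self_eq_true, if_true, List.map_cons] at h
      cases j with
      | zero =>
        simp at h
        exact ⟨0, by simp, by omega, by simp, by simp⟩
      | succ j' =>
        rw [List.getElem?_cons_succ] at h
        obtain ⟨m, hm, h1, h2, h3⟩ := ih (s+1) j' i h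
        refine ⟨m+1, by simpa using Nat.succ_lt_succ hm, by omega, by simpa using h2, ?_⟩
        simp [h3]
    · have hbeq : (k == c) = false := by simp [hk]
      simp only [List.filter_cons, hbeq, if_false, Bool.false_eq_true] at h
      obtain ⟨m, hm, h1, h2, h3⟩ := ih (s+1) j i h
      refine ⟨m+1, by simpa using Nat.succ_lt_succ hm, by omega, by simpa using h2, ?_⟩
      simp [h3, hk]

lemma pvOcc_complete (keys : List String) (c : String) : ∀ (s : Int) (m : Nat)
    (hm : m < keys.length), keys[m] = c →
    ((((PySem.List.enumerate keys s).filter (fun p => p.2 == c)).map (·.1))[(keys.take m).count c]? = some (s + m)) := by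
  induction keys with
  | nil => intro s m hm; simp at hm
  | cons k t ih =>
    intro s m hm hc
    rw [PySem.List.enumerate_cons]
    by_cases hk : k = c
    · subst hk
      simp only [List.filter_cons, beq_self_eq_true, if_true, List.map_cons]
      cases m with
      | zero => simp
      | succ m' =>
        have hm' : m' < t.length := by simpa using hm
        have hc' : t[m'] = k := by simpa using hc
        have := ih (s+1) m' hm' hc'
        simp only [List.take_succ_cons, List.count_cons, beq_self_eq_true, if_true]
        rw [List.getElem?_cons_succ]
        rw [this]
        congr 1; omega
    · have hbeq : (k == c) = false := by simp [hk]
      simp only [List.filter_cons, hbeq, if_false, Bool.false_eq_true]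
      cases m with
      | zero => exact absurd (by simpa using hc) hk
      | succ m' =>
        have hm' : m' < t.length := by simpa using hm
        have hc' : t[m'] = c := by simpa using hc
        have := ih (s+1) m' hm' hc'
        simp only [List.take_succ_cons, List.count_cons]
        simp only [hbeq, Bool.false_eq_true, if_false, Nat.add_zero]
        rw [this]; congr 1; omega

lemma pvOcc_nodup (keys : List String) (c : String) : (pvOcc keys c).Nodup := by
  unfold pvOcc
  have h := (PySem.List.pairwise_lt_enumerate keys 0).filter (fun p => p.2 == c)
  have h2 : (((PySem.List.enumerate keys).filter (fun p => p.2 == c)).map (·.1)).Pairwise (· ≠ ·) := by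
    rw [List.pairwise_map]
    exact h.imp (fun hlt => ne_of_lt hlt)
  exact h2

lemma pvOcc_mem (keys : List String) (c : String) (i : Int) (h : i ∈ pvOcc keys c) :
    ∃ m : Nat, ∃ hm : m < keys.length, i = (m : Int) ∧ keys[m] = c := by
  unfold pvOcc at h
  obtain ⟨p, hp, hpi⟩ := List.mem_map.mp h
  obtain ⟨hpe, hpc⟩ := List.mem_filter.mp hp
  obtain ⟨m, hm, rfl⟩ := (PySem.List.mem_enumerate_iff keys 0 p).mp hpe
  exact ⟨m, hm, by simpa using hpi.symm, by simpa using hpc⟩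

-- the grouping fold computes pvOcc
lemma pvPositions_getD (keys : List String) (c : String) :
    ((PySem.List.enumerate keys).foldl (fun d p => d.modify p.2 [] (· ++ [p.1]))
      PySem.Dict.empty).getD c [] = pvOcc keys c := by
  have h1 : (PySem.List.enumerate keys).foldl (fun d p => d.modify p.2 [] (· ++ [p.1]))
      PySem.Dict.empty
    = ((PySem.List.enumerate keys).map (fun p => (p.2, p.1))).foldl
        (fun d q => d.modify q.1 [] (· ++ [q.2])) PySem.Dict.empty := by
    rw [List.foldl_map]
  rw [h1, PySem.Dict.getD_foldl_modify_append]
  simp [pvOcc, List.filter_map, List.map_map, Function.comp_def]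

lemma pvPositions_nodup (keys : List String) :
    ((PySem.List.enumerate keys).foldl (fun d p => d.modify p.2 [] (· ++ [p.1]))
      PySem.Dict.empty).keys.Nodup :=
  PySem.Dict.nodup_keys_foldl_modify_key (PySem.List.enumerate keys) (fun p => p.2) []
    (fun _ p => (· ++ [p.1])) PySem.Dict.empty (by simp)

lemma pvPositions_get? (keys : List String) (c : String) (hc : c ∈ keys) :
    ((PySem.List.enumerate keys).foldl (fun d p => d.modify p.2 [] (· ++ [p.1]))
      PySem.Dict.empty).get? c = some (pvOcc keys c) := by
  set d := (PySem.List.enumerate keys).foldl (fun d p => d.modify p.2 [] (· ++ [p.1]))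
      PySem.Dict.empty with hd
  obtain ⟨m, hm, hcm⟩ := List.mem_iff_getElem.mp hc
  have hne : pvOcc keys c ≠ [] := by
    intro hnil
    have := pvOcc_complete keys c 0 m hm hcm
    rw [show ((PySem.List.enumerate keys 0).filter (fun p => p.2 == c)).map (·.1) = pvOcc keys c from rfl] at this
    simp [hnil] at this
  cases hg : d.get? c with
  | none =>
    have := PySem.Dict.getD_of_get?_eq_none d ([] : List Int) hg
    rw [pvPositions_getD] at this
    exact absurd this hne
  | some v =>
    have := PySem.Dict.getD_of_get?_eq_some d ([] : List Int) hg
    rw [pvPositions_getD] at this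
    rw [this]

-- items of the positions dict carry exactly pvOcc lists
lemma pvItems_val (keys : List String) (c : String) (idxs : List Int)
    (h : (c, idxs) ∈ ((PySem.List.enumerate keys).foldl (fun d p => d.modify p.2 [] (· ++ [p.1]))
      PySem.Dict.empty).items) : idxs = pvOcc keys c := by
  have hg := PySem.Dict.get?_of_mem_items _ h (pvPositions_nodup keys)
  have := PySem.Dict.getD_of_get?_eq_some _ ([] : List Int) hg
  rw [pvPositions_getD] at this
  exact this.symm

lemma pvApply_append (o : List String) (l1 l2 : List (Int × String)) :
    pvApply o (l1 ++ l2) = pvApply (pvApply o l1) l2 := by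
  simp [pvApply, List.foldl_append]

lemma pvApply_flatMap (items : List (String × List Int)) : ∀ (o : List String),
    items.foldl (fun o it => pvApply o (pvAsg it)) o = pvApply o (items.flatMap pvAsg) := by
  induction items with
  | nil => intro o; simp [pvApply]
  | cons it t ih => intro o; simp only [List.foldl_cons, List.flatMap_cons, pvApply_append]; exact ih _

-- scatter = pvApply of the flattened assignment list
lemma pvB_eq_apply (keys : List String) :
    append_suffixes_to_bibkeys_py_alt keys =
      pvApply keys ((((PySem.List.enumerate keys).foldl (fun d p => d.modify p.2 [] (· ++ [p.1]))
        PySem.Dict.empty).items).flatMap pvAsg) := by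
  unfold append_suffixes_to_bibkeys_py_alt
  rw [← pvApply_flatMap]
  show List.foldl _ keys _ = List.foldl _ keys _
  have hfun : (fun (out : List String) (kidxs : String × List Int) =>
      (PySem.List.enumerate (PySem.List.slice kidxs.2 (some 1) none) 2).foldl
        (fun out2 ri => PySem.List.pySetD out2 ri.2 (kidxs.1 ++ "-" ++ PySem.Int.toStr ri.1)) out)
      = fun o it => pvApply o (pvAsg it) := by
    funext o kidxs
    simp [pvAsg, pvApply, List.foldl_map]
  rw [hfun]

-- pvApply pointwise
lemma pvApply_length (l : List (Int × String)) : ∀ o, (pvApply o l).length = o.length := by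
  induction l with
  | nil => intro o; simp [pvApply]
  | cons p t ih => intro o; simp [pvApply, List.foldl_cons] at ih ⊢; rw [ih]; simp [PySem.List.length_pySetD]

lemma pvApply_get_notmem (l : List (Int × String)) : ∀ (o : List String) (i : Nat),
    (∀ p ∈ l, 0 ≤ p.1) → (∀ p ∈ l, p.1 ≠ (i : Int)) → (pvApply o l)[i]? = o[i]? := by
  induction l with
  | nil => intro o i _ _; simp [pvApply]
  | cons p t ih =>
    intro o i hnn hne
    have h0 : (0:Int) ≤ p.1 := hnn p (by simp)
    simp only [pvApply, List.foldl_cons]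
    rw [show (t.foldl (fun o p => PySem.List.pySetD o p.1 p.2)
        (PySem.List.pySetD o p.1 p.2)) = pvApply (PySem.List.pySetD o p.1 p.2) t from rfl]
    rw [ih _ i (fun q hq => hnn q (by simp [hq])) (fun q hq => hne q (by simp [hq]))]
    rw [PySem.List.pySetD_of_nonneg o p.2 h0]
    apply List.getElem?_set_ne
    intro hcontra
    exact hne p (by simp) (by omega)

lemma pvApply_get_mem (l : List (Int × String)) : ∀ (o : List String) (i : Nat) (v : String),
    (∀ p ∈ l, 0 ≤ p.1) → ((i : Int), v) ∈ l → (l.map (·.1)).Nodup → i < o.length →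
    (pvApply o l)[i]? = some v := by
  induction l with
  | nil => intro o i v _ hmem; simp at hmem
  | cons p t ih =>
    intro o i v hnn hmem hnd hlt
    have h0 : (0:Int) ≤ p.1 := hnn p (by simp)
    rw [List.map_cons, List.nodup_cons] at hnd
    simp only [pvApply, List.foldl_cons]
    rw [show (t.foldl (fun o p => PySem.List.pySetD o p.1 p.2)
        (PySem.List.pySetD o p.1 p.2)) = pvApply (PySem.List.pySetD o p.1 p.2) t from rfl]
    rcases List.mem_cons.mp hmem with heq | hmem'
    · have hp1 : p.1 = (i : Int) := by rw [← heq]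
      have : ∀ q ∈ t, q.1 ≠ (i : Int) := by
        intro q hq hcontra
        exact hnd.1 (by rw [hp1, ← hcontra]; exact List.mem_map_of_mem hq)
      rw [pvApply_get_notmem t _ i (fun q hq => hnn q (by simp [hq])) this]
      rw [PySem.List.pySetD_of_nonneg o p.2 h0]
      have : p.1.toNat = i := by omega
      rw [this, ← heq]
      exact List.getElem?_set_self hlt
    · have hp1 : p.1 ≠ (i : Int) := by
        intro hcontra
        exact hnd.1 (by rw [hcontra]; exact List.mem_map_of_mem hmem')
      rw [ih _ i v (fun q hq => hnn q (by simp [hq])) hmem' hnd.2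
        (by rw [PySem.List.length_pySetD]; exact hlt)]

-- characterization of the flattened assignment list
lemma pvAL_sound (keys : List String) (i : Int) (v : String)
    (h : (i, v) ∈ ((((PySem.List.enumerate keys).foldl (fun d p => d.modify p.2 [] (· ++ [p.1]))
        PySem.Dict.empty).items).flatMap pvAsg)) :
    ∃ m : Nat, ∃ hm : m < keys.length, i = (m : Int) ∧ 1 ≤ (keys.take m).count keys[m] ∧
      v = keys[m] ++ "-" ++ PySem.Int.toStr (((keys.take m).count keys[m] : Nat) + 1) := by
  rw [List.mem_flatMap] at h
  obtain ⟨⟨c, idxs⟩, hit, hin⟩ := h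
  have hidxs : idxs = pvOcc keys c := pvItems_val keys c idxs hit
  unfold pvAsg at hin
  rw [List.mem_map] at hin
  obtain ⟨ri, hri, hriv⟩ := hin
  rw [pvSlice_drop] at hri
  obtain ⟨k, hk, rfl⟩ := (PySem.List.mem_enumerate_iff _ 2 ri).mp hri
  dsimp only at hk hriv
  have hIdx : (pvOcc keys c)[k+1]? = some ((idxs.drop 1)[k]) := by
    rw [← hidxs, show k+1 = 1+k by omega, ← List.getElem?_drop (i := 1) (j := k)]
    exact List.getElem?_eq_getElem hk
  obtain ⟨m, hm, h1, h2, h3⟩ := pvOcc_sound keys c 0 (k+1) _ hIdx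
  have hi : (idxs.drop 1)[k] = i := congrArg Prod.fst hriv
  have hv : c ++ "-" ++ PySem.Int.toStr (2 + (k : Int)) = v := congrArg Prod.snd hriv
  refine ⟨m, hm, ?_, ?_, ?_⟩
  · omega
  · rw [h2, h3]; omega
  · rw [← hv, h2, h3]
    congr 1
    push_cast
    ring_nf

lemma pvAL_complete (keys : List String) (m : Nat) (hm : m < keys.length)
    (hc : 1 ≤ (keys.take m).count keys[m]) :
    ((m : Int), keys[m] ++ "-" ++ PySem.Int.toStr (((keys.take m).count keys[m] : Nat) + 1)) ∈
      ((((PySem.List.enumerate keys).foldl (fun d p => d.modify p.2 [] (· ++ [p.1]))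
        PySem.Dict.empty).items).flatMap pvAsg) := by
  set c := keys[m] with hcdef
  have hcm : c ∈ keys := List.getElem_mem hm
  have hget := pvPositions_get? keys c hcm
  have hitems := PySem.Dict.mem_items_of_get?_eq_some _ hget
  rw [List.mem_flatMap]
  refine ⟨(c, pvOcc keys c), hitems, ?_⟩
  unfold pvAsg
  rw [List.mem_map]
  set cnt := (keys.take m).count c with hcnt
  have hocc : (pvOcc keys c)[cnt]? = some (m : Int) := by
    have h0 := pvOcc_complete keys c 0 m hm rfl
    simp only [zero_add] at h0
    exact h0
  have hdrop : ((pvOcc keys c).drop 1)[cnt - 1]? = some (m : Int) := by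
    rw [List.getElem?_drop]
    rw [show 1 + (cnt - 1) = cnt by omega]
    exact hocc
  obtain ⟨hlen, hval⟩ := List.getElem?_eq_some_iff.mp hdrop
  refine ⟨(2 + ((cnt - 1 : Nat) : Int), ((pvOcc keys c).drop 1)[cnt - 1]), ?_, ?_⟩
  · rw [pvSlice_drop]
    exact (PySem.List.mem_enumerate_iff _ 2 _).mpr ⟨cnt - 1, hlen, rfl⟩
  · have h2' : (2 + ((cnt - 1 : Nat) : Int)) = ((cnt : Nat) : Int) + 1 := by omega
    dsimp only
    rw [hval, h2']

lemma pvAL_nodup (keys : List String) :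
    (((((PySem.List.enumerate keys).foldl (fun d p => d.modify p.2 [] (· ++ [p.1]))
        PySem.Dict.empty).items).flatMap pvAsg).map (·.1)).Nodup := by
  rw [List.map_flatMap]
  rw [List.nodup_flatMap]
  set items := (((PySem.List.enumerate keys).foldl (fun d p => d.modify p.2 [] (· ++ [p.1]))
        PySem.Dict.empty).items) with hitems
  have hmapAsg : ∀ it : String × List Int, (pvAsg it).map (·.1) = it.2.drop 1 := by
    intro it
    unfold pvAsg
    rw [pvSlice_drop, List.map_map]
    have : ((·.1) ∘ fun ri : Int × Int => (ri.2, it.1 ++ "-" ++ PySem.Int.toStr ri.1)) = (·.2) := by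
      funext ri; rfl
    rw [this, PySem.List.map_snd_enumerate]
  constructor
  · intro it hit
    rw [hmapAsg]
    have := pvItems_val keys it.1 it.2 (by rw [← hitems]; exact (Prod.mk.eta ▸ hit))
    rw [this]
    exact List.Nodup.sublist (List.drop_sublist _ _) (pvOcc_nodup keys it.1)
  · have hknd : (items.map (·.1)).Nodup := by
      have := pvPositions_nodup keys
      simpa [PySem.Dict.keys] using this
    have hpw : items.Pairwise (fun a b => a.1 ≠ b.1) := List.pairwise_map.mp hknd
    refine List.Pairwise.imp_of_mem ?_ hpw
    intro a b ha hb hne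
    unfold Function.onFun
    intro x hxa hxb
    dsimp only at hxa hxb
    rw [hmapAsg] at hxa hxb
    have hva := pvItems_val keys a.1 a.2 (by rw [← hitems]; exact (Prod.mk.eta ▸ ha))
    have hvb := pvItems_val keys b.1 b.2 (by rw [← hitems]; exact (Prod.mk.eta ▸ hb))
    rw [hva] at hxa
    rw [hvb] at hxb
    obtain ⟨ma, hma, hia, hca⟩ := pvOcc_mem keys a.1 x (List.mem_of_mem_drop hxa)
    obtain ⟨mb, hmb, hib, hcb⟩ := pvOcc_mem keys b.1 x (List.mem_of_mem_drop hxb)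
    have : ma = mb := by omega
    subst this
    exact hne (by rw [← hca, ← hcb])

-- ===== VERDICT (by name: the statement is the Claim_ definition above) =====
theorem append_suffixes_to_bibkeys_py_spec : Claim_equal_append_suffixes_to_bibkeys_py := by
  intro keys _
  unfold Spec_append_suffixes_to_bibkeys_py
  rw [pvA_eq_go, pvB_eq_apply]
  set AL := ((((PySem.List.enumerate keys).foldl (fun d p => d.modify p.2 [] (· ++ [p.1]))
      PySem.Dict.empty).items).flatMap pvAsg) with hAL
  have hnn : ∀ p ∈ AL, 0 ≤ p.1 := by
    intro p hp
    have hp' : (p.1, p.2) ∈ AL := by rw [Prod.mk.eta]; exact hp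
    rw [hAL] at hp'
    obtain ⟨m, hm, h1, _, _⟩ := pvAL_sound keys p.1 p.2 hp'
    omega
  apply List.ext_getElem?
  intro j
  by_cases hj : j < keys.length
  · rw [pvGo_getElem? keys [] j hj]
    by_cases hz : (keys.take j).count keys[j] = 0
    · rw [pvApply_get_notmem AL keys j hnn]
      · simp [pvFmt, hz]
      · intro p hp hpe
        have hp' : (p.1, p.2) ∈ AL := by rw [Prod.mk.eta]; exact hp
        rw [hAL] at hp'
        obtain ⟨m, hm, h1, h2, _⟩ := pvAL_sound keys p.1 p.2 hp'
        have : m = j := by omega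
        subst this; omega
    · rw [pvApply_get_mem AL keys j _ hnn (pvAL_complete keys j hj (by omega)) (pvAL_nodup keys) hj]
      simp [pvFmt, hz]
  · have h1 : (pvGo [] keys).length ≤ j := by rw [pvGo_length]; omega
    have h2 : (pvApply keys AL).length ≤ j := by rw [pvApply_length]; omega
    rw [List.getElem?_eq_none h1, List.getElem?_eq_none h2]
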